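-- pv_equiv track=rewrite | github.com/ShouyuWang08/PhantomMap | src/hits_cross_ref.py | _find_object_token_span
-- ===== SOURCE A (Python) =====
-- from typing import Optional
--
-- def _find_object_token_span(token_strs: list[str], obj: str) -> Optional[tuple[int, int]]:
--     """Locate the contiguous span (start, end) of generated tokens whose
--     joined text starts with the object name. Case-insensitive. Returns
--     None if we cannot find it."""
--     obj_low = obj.lower().strip()
--     joined = ""
--     starts = []
--     for i, t in enumerate(token_strs):
--         starts.append(len(joined))
--         joined += t
--     joined_low = joined.lower()
--     pos = joined_low.find(obj_low)
--     if pos < 0: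
--         return None
--     start_tok = None
--     end_tok = None
--     for i, s in enumerate(starts):
--         if start_tok is None and s >= pos:
--             start_tok = max(0, i - 1)
--         if s >= pos + len(obj_low):
--             end_tok = i
--             break
--     if start_tok is None:
--         start_tok = 0
--     if end_tok is None:
--         end_tok = len(token_strs)
--     return start_tok, end_tok
-- ===== SOURCE B (Python) =====
-- from typing import Optional
--
--
-- def _bisect_left(a: list[int], x: int) -> int:
--     lo, hi = 0, len(a)
--     while lo < hi:
--         mid = (lo + hi) // 2
--         if a[mid] < x:
--             lo = mid + 1
--         else:
--             hi = mid
--     return lo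
--
--
-- def _find_object_token_span(token_strs: list[str], obj: str) -> Optional[tuple[int, int]]:
--     obj_low = obj.lower().strip()
--     joined = "".join(token_strs)
--     starts = []
--     total = 0
--     for t in token_strs:
--         starts.append(total)
--         total += len(t)
--     pos = joined.lower().find(obj_low)
--     if pos < 0:
--         return None
--     n = len(starts)
--     i = _bisect_left(starts, pos)
--     start_tok = 0 if i == n else max(0, i - 1)
--     end_tok = _bisect_left(starts, pos + len(obj_low))
--     return start_tok, end_tok
-- ===== Notes on version B (the rewrite author's own statement) =====
-- stated objective: alternative
-- what changed: The two linear scans over the starts list (and the incremental string concatenation) are replaced by a single join plus a running-total prefix-sum build and two hand-written binary searches over the sorted starts list, reproducing A's corner behaviour (start 0 when the match begins in the final token region, end = len when nothing exceeds it) exactly.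
import Mathlib
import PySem

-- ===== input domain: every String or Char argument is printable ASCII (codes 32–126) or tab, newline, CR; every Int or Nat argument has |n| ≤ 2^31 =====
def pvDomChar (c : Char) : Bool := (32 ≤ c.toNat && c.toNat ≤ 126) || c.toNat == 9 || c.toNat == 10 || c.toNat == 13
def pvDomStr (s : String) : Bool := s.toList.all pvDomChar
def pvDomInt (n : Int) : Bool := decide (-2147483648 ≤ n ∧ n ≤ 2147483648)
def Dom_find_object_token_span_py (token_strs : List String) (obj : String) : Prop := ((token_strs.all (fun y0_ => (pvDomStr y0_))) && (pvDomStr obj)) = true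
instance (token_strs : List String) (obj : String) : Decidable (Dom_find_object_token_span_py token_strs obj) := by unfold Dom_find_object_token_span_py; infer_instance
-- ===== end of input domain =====

-- B replaces A's two linear scans over `starts` (and the incremental string concatenation)
-- by a join + running-total prefix build and two hand-written binary searches; same return value.


-- ===== PORT A =====
-- the `for i, s in enumerate(starts)` loop with its early `break`; st/et are start_tok/end_tok
def aScanLoop : List Int → Nat → Int → Int → Option Int → Option Int → Option Int × Option Int
  | [], _, _, _, st, et => (st, et)
  | s :: rest, i, pos, hi, st, et =>
    let st' := if st = none ∧ pos ≤ s then some (max 0 ((i : Int) - 1)) else st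
    if hi ≤ s then (st', some (i : Int))
    else aScanLoop rest (i + 1) pos hi st' et

def find_object_token_span_py (token_strs : List String) (obj : String) : Option (Int × Int) :=
  let obj_low := PySem.Chars.strip (PySem.Chars.lower obj.toList)
  -- the first loop: starts.append(len(joined)); joined += t
  let built := token_strs.foldl
    (fun (acc : List Char × List Int) t => (acc.1 ++ t.toList, acc.2 ++ [(acc.1.length : Int)]))
    ([], [])
  let joined_low := PySem.Chars.lower built.1
  let pos := PySem.Chars.find joined_low obj_low
  if pos < 0 then none
  else
    let r := aScanLoop built.2 0 pos (pos + (obj_low.length : Int)) none none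
    some (r.1.getD 0, r.2.getD (token_strs.length : Int))

-- ===== PORT B =====
-- Source B's hand-written `_bisect_left` while-loop (a[mid] is always in range; getD only for totality)
def bsearchLoop (a : List Int) (x : Int) (lo hi : Nat) : Nat :=
  if _h : lo < hi then
    let mid := (lo + hi) / 2
    if a.getD mid 0 < x then bsearchLoop a x (mid + 1) hi
    else bsearchLoop a x lo mid
  else lo
termination_by hi - lo
decreasing_by all_goals omega

def find_object_token_span_py_alt (token_strs : List String) (obj : String) : Option (Int × Int) :=
  let obj_low := PySem.Chars.strip (PySem.Chars.lower obj.toList)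
  let joined := PySem.Chars.join [] (token_strs.map String.toList)   -- "".join(token_strs)
  -- running-total prefix-sum build of starts
  let starts := (token_strs.foldl
      (fun (acc : List Int × Int) t => (acc.1 ++ [acc.2], acc.2 + (t.toList.length : Int)))
      ([], 0)).1
  let pos := PySem.Chars.find (PySem.Chars.lower joined) obj_low
  if pos < 0 then none
  else
    let n := starts.length
    let i := bsearchLoop starts pos 0 n
    let start_tok : Int := if i = n then 0 else max 0 ((i : Int) - 1)
    let end_tok := bsearchLoop starts (pos + (obj_low.length : Int)) 0 n
    some (start_tok, (end_tok : Int))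

-- ===== PRECONDITION & SPEC =====
def Spec_find_object_token_span_py (token_strs : List String) (obj : String) (out : Option (Int × Int)) : Prop := out = find_object_token_span_py_alt token_strs obj
instance (token_strs : List String) (obj : String) (out : Option (Int × Int)) : Decidable (Spec_find_object_token_span_py token_strs obj out) := by unfold Spec_find_object_token_span_py; infer_instance

-- ===== CLAIM (what is proved, stated in full; the proofs are below) =====
def Claim_equal_find_object_token_span_py : Prop := ∀ (token_strs : List String) (obj : String), Dom_find_object_token_span_py token_strs obj → Spec_find_object_token_span_py token_strs obj (find_object_token_span_py token_strs obj)

-- ===== LEMMAS AND PROOFS =====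

-- both builds produce the same joined text and the same starts list
lemma pv_build_eq (ts : List String) (j : List Char) (s : List Int) :
    ts.foldl (fun (acc : List Char × List Int) t => (acc.1 ++ t.toList, acc.2 ++ [(acc.1.length : Int)])) (j, s)
    = (j ++ (ts.map String.toList).flatten,
       (ts.foldl (fun (acc : List Int × Int) t => (acc.1 ++ [acc.2], acc.2 + (t.toList.length : Int))) (s, (j.length : Int))).1) := by
  induction ts generalizing j s with
  | nil => simp
  | cons t ts ih =>
    simp only [List.foldl_cons, List.map_cons, List.flatten_cons]
    rw [ih]
    simp [List.length_append, List.append_assoc]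

lemma pv_join_nil_eq_flatten (l : List (List Char)) :
    PySem.Chars.join [] l = l.flatten := by
  simp only [PySem.Chars.join, List.intercalate]
  induction l with
  | nil => simp
  | cons x t ih =>
    cases t with
    | nil => simp
    | cons y t2 =>
      rw [show List.intersperse ([] : List Char) (x :: y :: t2) = x :: [] :: List.intersperse [] (y :: t2) from List.intersperse_cons₂ ..]
      simp only [List.flatten_cons] at ih ⊢
      simp [ih]

lemma pv_bfold_len (ts : List String) (s : List Int) (c : Int) :
    ((ts.foldl (fun (acc : List Int × Int) t => (acc.1 ++ [acc.2], acc.2 + (t.toList.length : Int))) (s, c)).1).length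
      = s.length + ts.length := by
  induction ts generalizing s c with
  | nil => simp
  | cons t ts ih =>
    simp only [List.foldl_cons]
    rw [ih]
    simp
    omega

lemma pv_bfold_sorted (ts : List String) (s : List Int) (c : Int)
    (hs : List.Pairwise (· ≤ ·) s) (hb : ∀ x ∈ s, x ≤ c) :
    List.Pairwise (· ≤ ·)
      ((ts.foldl (fun (acc : List Int × Int) t => (acc.1 ++ [acc.2], acc.2 + (t.toList.length : Int))) (s, c)).1) := by
  induction ts generalizing s c with
  | nil => exact hs
  | cons t ts ih =>
    simp only [List.foldl_cons]
    apply ih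
    · simp [List.pairwise_append, hs]
      exact hb
    · intro x hx
      rcases List.mem_append.1 hx with h | h
      · have := hb x h; have : (0:Int) ≤ t.toList.length := by positivity
        omega
      · simp at h; subst h
        have : (0:Int) ≤ t.toList.length := by positivity
        omega

lemma pv_sorted_getD_mono (a : List Int) (hs : List.Pairwise (· ≤ ·) a)
    {i j : Nat} (hij : i ≤ j) (hj : j < a.length) :
    a.getD i 0 ≤ a.getD j 0 := by
  rcases Nat.lt_or_ge i j with h | h
  · have := (List.pairwise_iff_getElem.1 hs) i j (by omega) hj h
    simpa [List.getD_eq_getElem?_getD, List.getElem?_eq_getElem, hj, show i < a.length by omega] using this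
  · have : i = j := by omega
    subst this; rfl

lemma pv_bsearch_spec (fuel : Nat) (a : List Int) (x : Int) (lo hi : Nat)
    (hf : hi - lo ≤ fuel)
    (hs : List.Pairwise (· ≤ ·) a) (hhi : hi ≤ a.length) (hlo : lo ≤ hi)
    (hbelow : ∀ i < lo, a.getD i 0 < x)
    (habove : ∀ i, hi ≤ i → i < a.length → x ≤ a.getD i 0) :
    (∀ i < bsearchLoop a x lo hi, a.getD i 0 < x) ∧
    (∀ i, bsearchLoop a x lo hi ≤ i → i < a.length → x ≤ a.getD i 0) ∧
    bsearchLoop a x lo hi ≤ a.length := by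
  induction fuel generalizing lo hi with
  | zero =>
    have hEq : lo = hi := by omega
    rw [bsearchLoop]
    simp only [show ¬ lo < hi by omega, dif_neg, not_false_iff]
    subst hEq
    exact ⟨hbelow, habove, by omega⟩
  | succ f ih =>
    rw [bsearchLoop]
    by_cases h : lo < hi
    · simp only [dif_pos h]
      set mid := (lo + hi) / 2 with hmid
      have hmlo : lo ≤ mid := by omega
      have hmhi : mid < hi := by omega
      by_cases hc : a.getD mid 0 < x
      · simp only [if_pos hc]
        apply ih (mid + 1) hi (by omega) (by omega) (by omega)
        · intro i hi2
          exact lt_of_le_of_lt (pv_sorted_getD_mono a hs (by omega) (by omega)) hc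
        · exact habove
      · simp only [if_neg hc]
        apply ih lo mid (by omega) (by omega) (by omega)
        · exact hbelow
        · intro i h1 h2
          exact le_trans (not_lt.1 hc) (pv_sorted_getD_mono a hs h1 h2)
    · simp only [dif_neg h]
      have : lo = hi := by omega
      subst this
      exact ⟨hbelow, habove, by omega⟩

lemma pv_bsearch_eq_findIdx? (a : List Int) (x : Int) (hs : List.Pairwise (· ≤ ·) a) :
    (if bsearchLoop a x 0 a.length = a.length then (none : Option Nat) else some (bsearchLoop a x 0 a.length))
      = a.findIdx? (fun s => decide (x ≤ s)) := by
  obtain ⟨h1, h2, h3⟩ := pv_bsearch_spec a.length a x 0 a.length (by omega) hs (le_refl _) (by omega)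
    (by omega) (fun i h hl => absurd h (by omega))
  by_cases he : bsearchLoop a x 0 a.length = a.length
  · rw [if_pos he]
    symm; rw [List.findIdx?_eq_none_iff]
    intro y hy
    obtain ⟨i, hi, rfl⟩ := List.mem_iff_getElem.1 hy
    have := h1 i (by omega)
    simp [List.getD_eq_getElem?_getD, hi] at this
    simp; omega
  · rw [if_neg he]
    symm; rw [List.findIdx?_eq_some_iff_getElem]
    have hlt : bsearchLoop a x 0 a.length < a.length := by omega
    refine ⟨hlt, ?_, ?_⟩
    · have := h2 (bsearchLoop a x 0 a.length) (le_refl _) hlt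
      simp [List.getD_eq_getElem?_getD, hlt] at this
      simpa using this
    · intro j hj
      have := h1 j hj
      have hjl : j < a.length := by omega
      simp [List.getD_eq_getElem?_getD, hjl] at this
      simp; omega

-- once start_tok is set, the first branch never fires again
lemma pv_aScan_some (l : List Int) (i : Nat) (pos hi : Int) (v : Int) :
    aScanLoop l i pos hi (some v) none
      = (some v, (l.findIdx? (fun s => decide (hi ≤ s))).map (fun j => ((i + j : Nat) : Int))) := by
  induction l generalizing i with
  | nil => simp [aScanLoop]
  | cons s rest ih =>
    rw [aScanLoop]
    rw [if_neg (by simp : ¬((some v : Option Int) = none ∧ pos ≤ s))]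
    by_cases h : hi ≤ s
    · simp [h, List.findIdx?_cons]
    · rw [if_neg h, ih (i + 1)]
      simp only [List.findIdx?_cons, decide_eq_true_eq, if_neg h]
      cases hfd : List.findIdx? (fun s => decide (hi ≤ s)) rest with
      | none => simp
      | some j =>
        simp only [Option.map_some]
        norm_num
        omega

lemma pv_aScan_none (l : List Int) (i : Nat) (pos hi : Int) (hph : pos ≤ hi) :
    aScanLoop l i pos hi none none
      = ((l.findIdx? (fun s => decide (pos ≤ s))).map (fun j => max 0 (((i + j : Nat) : Int) - 1)),
         (l.findIdx? (fun s => decide (hi ≤ s))).map (fun j => ((i + j : Nat) : Int))) := by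
  induction l generalizing i with
  | nil => simp [aScanLoop]
  | cons s rest ih =>
    rw [aScanLoop]
    by_cases hp : pos ≤ s
    · rw [if_pos (show (none : Option Int) = none ∧ pos ≤ s from ⟨rfl, hp⟩)]
      by_cases h : hi ≤ s
      · simp [h, hp, List.findIdx?_cons]
      · rw [if_neg h, pv_aScan_some]
        simp only [List.findIdx?_cons, decide_eq_true_eq, if_pos hp, if_neg h]
        cases hfd : List.findIdx? (fun s => decide (hi ≤ s)) rest with
        | none => simp
        | some j =>
          simp only [Option.map_some]
          norm_num
          omega
    · have h : ¬ hi ≤ s := by omega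
      rw [if_neg (show ¬((none : Option Int) = none ∧ pos ≤ s) by simp [hp]), if_neg h, ih (i + 1)]
      simp only [List.findIdx?_cons, decide_eq_true_eq, if_neg h, if_neg hp]
      refine congrArg₂ Prod.mk ?_ ?_
      · cases hfd : List.findIdx? (fun s => decide (pos ≤ s)) rest with
        | none => simp
        | some j =>
          simp only [Option.map_some]
          norm_num
          omega
      · cases hfd : List.findIdx? (fun s => decide (hi ≤ s)) rest with
        | none => simp
        | some j =>
          simp only [Option.map_some]
          norm_num
          omega

-- ===== VERDICT (by name: the statement is the Claim_ definition above) =====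
theorem find_object_token_span_py_spec : Claim_equal_find_object_token_span_py := by
  intro ts obj _
  unfold Spec_find_object_token_span_py
  simp only [find_object_token_span_py, find_object_token_span_py_alt]
  rw [pv_build_eq ts [] [], pv_join_nil_eq_flatten]
  simp only [List.nil_append, List.length_nil, Nat.cast_zero]
  set obj_low := PySem.Chars.strip (PySem.Chars.lower obj.toList) with hol
  set starts := (ts.foldl (fun (acc : List Int × Int) t => (acc.1 ++ [acc.2], acc.2 + (t.toList.length : Int))) ([], 0)).1 with hst
  set pos := PySem.Chars.find (PySem.Chars.lower (ts.map String.toList).flatten) obj_low with hposdef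
  by_cases hneg : pos < 0
  · simp [hneg]
  · simp only [if_neg hneg]
    have hsorted : List.Pairwise (· ≤ ·) starts := pv_bfold_sorted ts [] 0 (by simp) (by simp)
    have hlen : starts.length = ts.length := by simpa using pv_bfold_len ts [] 0
    have hL : (0:Int) ≤ (obj_low.length : Int) := by positivity
    rw [pv_aScan_none _ _ _ _ (by omega)]
    have h1 := pv_bsearch_eq_findIdx? starts pos hsorted
    have h2 := pv_bsearch_eq_findIdx? starts (pos + (obj_low.length : Int)) hsorted
    rw [← hlen]
    cases hf1 : List.findIdx? (fun s => decide (pos ≤ s)) starts with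
    | none =>
      rw [hf1] at h1
      have hr1 : bsearchLoop starts pos 0 starts.length = starts.length := by
        by_cases h : bsearchLoop starts pos 0 starts.length = starts.length
        · exact h
        · rw [if_neg h] at h1; exact absurd h1 (by simp)
      cases hf2 : List.findIdx? (fun s => decide (pos + (obj_low.length : Int) ≤ s)) starts with
      | none =>
        rw [hf2] at h2
        have hr2 : bsearchLoop starts (pos + (obj_low.length : Int)) 0 starts.length = starts.length := by
          by_cases h : bsearchLoop starts (pos + (obj_low.length : Int)) 0 starts.length = starts.length
          · exact h
          · rw [if_neg h] at h2; exact absurd h2 (by simp)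
        simp [hr1, hr2]
      | some j2 =>
        rw [hf2] at h2
        have hr2ne : ¬ bsearchLoop starts (pos + (obj_low.length : Int)) 0 starts.length = starts.length := by
          intro h; rw [if_pos h] at h2; exact absurd h2 (by simp)
        rw [if_neg hr2ne] at h2
        have hr2 : bsearchLoop starts (pos + (obj_low.length : Int)) 0 starts.length = j2 := by
          simpa using h2
        simp [hr1, hr2]
    | some j1 =>
      rw [hf1] at h1
      have hr1ne : ¬ bsearchLoop starts pos 0 starts.length = starts.length := by
        intro h; rw [if_pos h] at h1; exact absurd h1 (by simp)
      rw [if_neg hr1ne] at h1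
      have hr1 : bsearchLoop starts pos 0 starts.length = j1 := by simpa using h1
      obtain ⟨hj1lt, -⟩ := List.findIdx?_eq_some_iff_getElem.mp hf1
      cases hf2 : List.findIdx? (fun s => decide (pos + (obj_low.length : Int) ≤ s)) starts with
      | none =>
        rw [hf2] at h2
        have hr2 : bsearchLoop starts (pos + (obj_low.length : Int)) 0 starts.length = starts.length := by
          by_cases h : bsearchLoop starts (pos + (obj_low.length : Int)) 0 starts.length = starts.length
          · exact h
          · rw [if_neg h] at h2; exact absurd h2 (by simp)
        simp [hr1, hr2]
        omega
      | some j2 =>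
        rw [hf2] at h2
        have hr2ne : ¬ bsearchLoop starts (pos + (obj_low.length : Int)) 0 starts.length = starts.length := by
          intro h; rw [if_pos h] at h2; exact absurd h2 (by simp)
        rw [if_neg hr2ne] at h2
        have hr2 : bsearchLoop starts (pos + (obj_low.length : Int)) 0 starts.length = j2 := by
          simpa using h2
        simp [hr1, hr2]
        omega
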